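-- pv_equiv track=rewrite | github.com/sdoram/Algorithm | 프로그래머스/lv0/120911. 문자열 정렬하기 （2）/문자열 정렬하기 （2）.py | solution
-- ===== SOURCE A (Python) =====
-- def solution(my_string):
--     answer = ''
--     ord_list = []
--     for i in my_string:
--             i = i.lower()
--             ord_list.append(i)
--     # sorted()를 통해서 리스트를 오름차순으로 정렬
--     sort_list = sorted(ord_list)
--     # 정렬한 ord_list를 for문으로 answer에 집어넣기
--     for i in sort_list:
--         answer += i
--     return answer
-- ===== SOURCE B (Python) =====
-- def solution(my_string):
--     counts = {}
--     for ch in my_string: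
--         t = ch.lower()
--         counts[t] = counts.get(t, 0) + 1
--     return ''.join(t * counts[t] for t in sorted(counts))
-- ===== Notes on version B (the rewrite author's own statement) =====
-- stated objective: faster
-- what changed: Instead of lowercasing every character and sorting the whole n-element list before concatenating, B makes one pass that counts each lowercased token in a dict and then emits token*count over the sorted distinct keys.
import Mathlib
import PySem

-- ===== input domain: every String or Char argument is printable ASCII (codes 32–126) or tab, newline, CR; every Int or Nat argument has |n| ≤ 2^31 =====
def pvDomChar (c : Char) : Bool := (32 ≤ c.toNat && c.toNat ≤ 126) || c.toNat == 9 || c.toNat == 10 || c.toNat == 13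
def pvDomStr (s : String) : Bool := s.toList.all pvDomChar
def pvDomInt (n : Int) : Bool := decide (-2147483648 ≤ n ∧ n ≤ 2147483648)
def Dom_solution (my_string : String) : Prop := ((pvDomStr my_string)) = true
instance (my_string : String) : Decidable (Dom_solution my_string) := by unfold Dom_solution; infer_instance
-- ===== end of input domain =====

-- B groups the characters into a count-per-lowercased-token table and emits token*count over the
-- sorted distinct tokens, instead of sorting the whole lowercased character list (measured faster in a timing run).
-- On the ASCII domain each character's .lower() is a single character, so tokens are ported as Char
-- via PySem.Chars.lowerChar (exact on the stated ASCII domain).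

-- ===== PORT A =====
def solution (my_string : String) : String :=
  let ordList := my_string.toList.foldl (fun acc i => acc ++ [PySem.Chars.lowerChar i]) []
  let sortList := PySem.List.sorted ordList (fun x => x) false
  String.ofList (sortList.foldl (fun acc i => acc ++ [i]) [])

-- ===== PORT B =====
def solution_alt (my_string : String) : String :=
  let counts := my_string.toList.foldl
    (fun d ch => d.insert (PySem.Chars.lowerChar ch) (d.getD (PySem.Chars.lowerChar ch) 0 + 1))
    (PySem.Dict.empty : PySem.Dict Char Int)
  let keysSorted := PySem.List.sorted counts.keys (fun x => x) false
  String.ofList (keysSorted.foldl (fun acc t => acc ++ PySem.List.pyRepeat [t] (counts.getD t 0)) [])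

-- ===== PRECONDITION & SPEC =====
def Spec_solution (my_string : String) (out : String) : Prop := out = solution_alt my_string
instance (my_string : String) (out : String) : Decidable (Spec_solution my_string out) := by unfold Spec_solution; infer_instance

-- ===== CLAIM (what is proved, stated in full; the proofs are below) =====
def Claim_equal_solution : Prop := ∀ (my_string : String), Dom_solution my_string → Spec_solution my_string (solution my_string)

-- ===== LEMMAS AND PROOFS =====

lemma count_flatMap_replicate (ks : List Char) (c : Char → Nat) (hnd : ks.Nodup) (a : Char) :
    (ks.flatMap fun t => List.replicate (c t) t).count a = if a ∈ ks then c a else 0 := by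
  induction ks with
  | nil => simp
  | cons k t ih =>
    rcases List.nodup_cons.mp hnd with ⟨hk, hnd'⟩
    simp only [List.flatMap_cons, List.count_append, List.count_replicate, ih hnd', List.mem_cons]
    by_cases hak : a = k
    · subst hak; simp [hk]
    · simp [hak, Ne.symm hak]

lemma pairwise_flatMap_replicate (ks : List Char) (c : Char → Nat)
    (h : ks.Pairwise (· < ·)) :
    (ks.flatMap fun t => List.replicate (c t) t).Pairwise (· ≤ ·) := by
  induction ks with
  | nil => simp
  | cons k t ih =>
    rcases List.pairwise_cons.mp h with ⟨hk, ht⟩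
    simp only [List.flatMap_cons]
    rw [List.pairwise_append]
    refine ⟨List.pairwise_replicate.mpr (Or.inr le_rfl), ih ht, ?_⟩
    intro a ha b hb
    have hak : a = k := List.eq_of_mem_replicate ha
    rcases List.mem_flatMap.mp hb with ⟨u, hu, hbu⟩
    have hbu' : b = u := List.eq_of_mem_replicate hbu
    rw [hak, hbu']
    exact le_of_lt (hk u hu)

-- ===== VERDICT (by name: the statement is the Claim_ definition above) =====
theorem solution_spec : Claim_equal_solution := by
  intro my_string _
  unfold Spec_solution solution solution_alt
  set lows : List Char := my_string.toList.map PySem.Chars.lowerChar with hlows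
  -- A side: the two folds are map / identity append
  have hA1 : my_string.toList.foldl (fun acc i => acc ++ [PySem.Chars.lowerChar i]) [] = lows := by
    simpa using PySem.List.foldl_append_singleton_eq_map PySem.Chars.lowerChar my_string.toList []
  -- B side: the counting loop is a fold over lows
  have hfold : my_string.toList.foldl
      (fun d ch => d.insert (PySem.Chars.lowerChar ch) (d.getD (PySem.Chars.lowerChar ch) 0 + 1))
      (PySem.Dict.empty : PySem.Dict Char Int)
      = lows.foldl (fun d x => d.insert x (d.getD x 0 + 1)) PySem.Dict.empty := by
    rw [hlows, List.foldl_map]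
  set counts := lows.foldl (fun d x => d.insert x (d.getD x 0 + 1))
      (PySem.Dict.empty : PySem.Dict Char Int) with hc
  have hgetD : ∀ v, counts.getD v 0 = (lows.count v : Int) := by
    intro v
    rw [hc, PySem.Dict.getD_foldl_insert_add_one]
    simp [PySem.Dict.getD_empty]
  have hkeys : counts.keys = PySem.Set.ofList lows := by
    rw [hc, PySem.Dict.keys_foldl_insert]
    simp [PySem.Dict.keys_empty, PySem.Set.update, PySem.Set.ofList_eq_foldl]
  set ks := PySem.List.sorted (PySem.Set.ofList lows) (fun x => x) false with hks
  have hpw : ks.Pairwise (· < ·) := PySem.List.sorted_ofList_pairwise_lt lows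
  have hmem : ∀ a, a ∈ ks ↔ a ∈ lows := by
    intro a
    rw [hks, PySem.List.mem_sorted, PySem.Set.mem_ofList]
  have hnd : ks.Nodup := hpw.nodup
  -- B's emission fold is a flatMap of replicates
  have hB : ks.foldl (fun acc t => acc ++ List.replicate (lows.count t) t) []
      = ks.flatMap (fun t => List.replicate (lows.count t) t) := by
    simpa using PySem.List.foldl_append_eq_flatMap (fun t => List.replicate (lows.count t) t) ks []
  set out := ks.flatMap (fun t => List.replicate (lows.count t) t) with hout
  -- out is a ≤-sorted permutation of lows, hence equals sorted(lows)
  have hperm : out.Perm lows := by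
    rw [List.perm_iff_count]
    intro a
    rw [hout, count_flatMap_replicate ks _ hnd a]
    by_cases ha : a ∈ ks
    · simp [ha]
    · have : a ∉ lows := fun h => ha ((hmem a).mpr h)
      simp [ha, List.count_eq_zero_of_not_mem this]
  have hsorted : PySem.List.sorted lows (fun x => x) false = out :=
    PySem.List.sorted_id_eq_of_perm_of_pairwise _ _ hperm
      (pairwise_flatMap_replicate ks _ hpw)
  -- assemble
  simp only [hA1, hfold, hkeys, ← hks]
  congr 1
  calc (PySem.List.sorted lows (fun x => x) false).foldl (fun acc i => acc ++ [i]) []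
      = PySem.List.sorted lows (fun x => x) false := by
        rw [PySem.List.foldl_append_singleton]
        exact List.nil_append _
    _ = out := hsorted
    _ = ks.foldl (fun acc t => acc ++ List.replicate (lows.count t) t) [] := hB.symm
    _ = ks.foldl (fun acc t => acc ++ PySem.List.pyRepeat [t] (counts.getD t 0)) [] := by
        apply PySem.List.foldl_congr_mem
        intro acc t ht
        rw [hgetD, PySem.List.pyRepeat_singleton, Int.toNat_natCast]
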